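-- pv_equiv track=rewrite | github.com/kasheen8/TPR | math_module_lab2.py | set_of_minimum
-- ===== SOURCE A (Python) =====
-- def set_of_minimum(matrix): #возвращает множество минимумов
--     size = len(matrix)
--     array_of_minimum = []
--     for j in range(size):
--         Minimum = True
--         for i in range(size):
--             if matrix[i][j] == 0:
--                 Minimum = False
--         if Minimum:
--             array_of_minimum.append(j + 1)
--     return array_of_minimum
-- ===== SOURCE B (Python) =====
-- def set_of_minimum(matrix):
--     # Candidate-refinement: start with all columns and let each row strike out
--     # the candidates where it holds a zero; survivors are the zero-free columns.
--     survivors = list(range(len(matrix)))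
--     for row in matrix:
--         survivors = [j for j in survivors if row[j] != 0]
--     return [j + 1 for j in survivors]
-- ===== Notes on version B (the rewrite author's own statement) =====
-- stated objective: alternative
-- what changed: A scans each column over all rows with a boolean flag in a nested index loop; B maintains a shrinking candidate list of columns and refines it once per row (each row filters out the candidates where it holds a zero), with no index-based outer loop over columns and no per-column flag.
import Mathlib
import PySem

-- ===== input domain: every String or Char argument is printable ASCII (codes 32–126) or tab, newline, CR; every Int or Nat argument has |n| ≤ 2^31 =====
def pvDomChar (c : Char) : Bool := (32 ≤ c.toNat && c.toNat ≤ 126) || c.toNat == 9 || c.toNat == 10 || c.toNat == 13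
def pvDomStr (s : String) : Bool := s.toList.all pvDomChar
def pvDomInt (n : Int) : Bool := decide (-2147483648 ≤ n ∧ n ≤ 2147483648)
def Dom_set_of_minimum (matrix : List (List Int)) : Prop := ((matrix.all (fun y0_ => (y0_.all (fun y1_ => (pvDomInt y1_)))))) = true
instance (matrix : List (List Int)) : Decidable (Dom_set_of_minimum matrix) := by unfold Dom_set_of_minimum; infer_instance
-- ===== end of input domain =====

-- B replaces A's per-column flag scan by candidate refinement: each row filters a
-- shrinking list of surviving columns (alternative decomposition, same worst-case cost).

-- ===== PORT A =====
def set_of_minimum (matrix : List (List Int)) : List Int :=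
  let size : Int := matrix.length
  (PySem.List.pyRange 0 size 1).foldl (fun acc j =>
    let minimum : Bool :=
      (PySem.List.pyRange 0 size 1).foldl (fun m i =>
        if PySem.List.pyGetD (PySem.List.pyGetD matrix i []) j 0 = 0 then false else m) true
    if minimum then acc ++ [j + 1] else acc) []

-- ===== PORT B =====
def set_of_minimum_alt (matrix : List (List Int)) : List Int :=
  let survivors : List Int := matrix.foldl
    (fun surv row => surv.filter (fun j => !(PySem.List.pyGetD row j 0 == 0)))
    (PySem.List.pyRange 0 (matrix.length : Int) 1)
  survivors.map (fun j => j + 1)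

-- ===== PRECONDITION & SPEC =====
-- Pre_ excludes ragged matrices with a row shorter than the number of rows: there Python A raises IndexError.
def Pre_set_of_minimum (matrix : List (List Int)) : Prop :=
  ∀ row ∈ matrix, matrix.length ≤ row.length
instance (matrix : List (List Int)) : Decidable (Pre_set_of_minimum matrix) := by
  unfold Pre_set_of_minimum; infer_instance
def pvWitness_set_of_minimum : List (List Int) := [[1, 0], [2, 3]]

def Spec_set_of_minimum (matrix : List (List Int)) (out : List Int) : Prop := out = set_of_minimum_alt matrix
instance (matrix : List (List Int)) (out : List Int) : Decidable (Spec_set_of_minimum matrix out) := by unfold Spec_set_of_minimum; infer_instance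

-- ===== CLAIM (what is proved, stated in full; the proofs are below) =====
def Claim_equal_set_of_minimum : Prop := ∀ (matrix : List (List Int)), Dom_set_of_minimum matrix → Pre_set_of_minimum matrix → Spec_set_of_minimum matrix (set_of_minimum matrix)

-- ===== LEMMAS AND PROOFS =====

-- A's inner per-column loop computes "no row has a zero in this column".
lemma pvInnerA (g : Int → Int) (l : List Int) (b : Bool) :
    l.foldl (fun m i => if g i = 0 then false else m) b
      = (b && l.all (fun i => !(g i == 0))) := by
  induction l generalizing b with
  | nil => simp
  | cons x t ih =>
      simp only [List.foldl_cons, List.all_cons, ih]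
      by_cases h : g x = 0
      · simp [h]
      · rw [beq_eq_false_iff_ne.mpr h]; simp [h]

-- B's refinement loop is one filter by "every row passes".
lemma pvRefine (q : List Int → Int → Bool) (rows : List (List Int)) (l : List Int) :
    rows.foldl (fun s r => s.filter (q r)) l
      = l.filter (fun j => rows.all (fun r => q r j)) := by
  induction rows generalizing l with
  | nil => simp
  | cons r t ih =>
      simp only [List.foldl_cons, ih, List.filter_filter, List.all_cons]
      apply List.filter_congr
      intro j _
      simp [Bool.and_comm]

-- the common canonical form both proofs target
def pvCanon (matrix : List (List Int)) : List Int :=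
  ((PySem.List.pyRange 0 (matrix.length : Int) 1).filter
      (fun j => matrix.all (fun row => !(PySem.List.pyGetD row j 0 == 0)))).map (fun j => j + 1)

lemma pvA_eq (matrix : List (List Int)) : set_of_minimum matrix = pvCanon matrix := by
  unfold set_of_minimum pvCanon
  rw [PySem.List.foldl_append_if]
  simp only [List.nil_append]
  congr 1
  apply List.filter_congr
  intro j hj
  rw [pvInnerA (fun i => PySem.List.pyGetD (PySem.List.pyGetD matrix i []) j 0), Bool.true_and]
  calc ((PySem.List.pyRange 0 (matrix.length : Int) 1).all
          fun i => !(PySem.List.pyGetD (PySem.List.pyGetD matrix i []) j 0 == 0))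
      = ((PySem.List.pyRange 0 (matrix.length : Int) 1).map
          (fun i => PySem.List.pyGetD matrix i ([] : List Int))).all
          (fun row => !(PySem.List.pyGetD row j 0 == 0)) := by
        rw [List.all_map]; rfl
    _ = matrix.all (fun row => !(PySem.List.pyGetD row j 0 == 0)) := by
        rw [PySem.List.map_pyGetD_pyRange_zero']

lemma pvB_eq (matrix : List (List Int)) : set_of_minimum_alt matrix = pvCanon matrix := by
  unfold set_of_minimum_alt pvCanon
  rw [pvRefine]

-- ===== VERDICT (by name: the statement is the Claim_ definition above) =====
theorem set_of_minimum_spec : Claim_equal_set_of_minimum := by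
  intro matrix _ _
  unfold Spec_set_of_minimum
  rw [pvA_eq, pvB_eq]
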